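-- pv_equiv track=rewrite | github.com/jwsearle18/NLP-SAH_identification | featureMatrix/lydia/feat_matrix code text mod.py | count_context_features
-- ===== SOURCE A (Python) =====
-- def count_context_features(text, target_words, context_words, window_size=15):
--     tokens = text.split()
--     near_count = 0
--     far_count = 0
--     for i, token in enumerate(tokens):
--         if token in target_words:
--             left_context = tokens[max(0, i - window_size):i]
--             right_context = tokens[i + 1:i + 1 + window_size]
--             context = left_context + right_context
--             if any(context_word in context for context_word in context_words):
--                 near_count += 1
--             else:
--                 far_count += 1
--     return near_count, far_count
-- ===== SOURCE B (Python) =====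
-- def count_context_features(text, target_words, context_words, window_size=15):
--     tokens = text.split()
--     targets = set(target_words)
--     contexts = set(context_words)
--     n = len(tokens)
--     w = max(window_size, 0)
--     # prefix[k] = number of context-word tokens among tokens[:k]
--     prefix = [0]
--     for tok in tokens:
--         prefix.append(prefix[-1] + (tok in contexts))
--     near_count = 0
--     far_count = 0
--     for i, tok in enumerate(tokens):
--         if tok in targets:
--             lo = max(0, i - w)
--             hi = min(n, i + 1 + w)
--             if prefix[hi] - prefix[lo] - (tok in contexts) > 0:
--                 near_count += 1
--             else:
--                 far_count += 1
--     return near_count, far_count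
-- ===== Notes on version B (the rewrite author's own statement) =====
-- stated objective: alternative
-- what changed: replaces A's per-target rebuild of the two window slices and scan of every context word over them by a single prefix-sum array of a context-word indicator, from which each target's window count is a difference of two table entries
-- intended difference: For negative window_size with a target word near the start of a long enough token list, A's right slice tokens[i+1:i+1+window_size] gets a negative end index that wraps to the end of the list, so A counts such targets as near context words that lie outside any window; B treats a negative window as empty and counts every target as far, the intended reading of a window size. — e.g. on count_context_features("a b c", ["a"], ["b"], -2): A returns (1, 0), B returns (0, 1)
import Mathlib
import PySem

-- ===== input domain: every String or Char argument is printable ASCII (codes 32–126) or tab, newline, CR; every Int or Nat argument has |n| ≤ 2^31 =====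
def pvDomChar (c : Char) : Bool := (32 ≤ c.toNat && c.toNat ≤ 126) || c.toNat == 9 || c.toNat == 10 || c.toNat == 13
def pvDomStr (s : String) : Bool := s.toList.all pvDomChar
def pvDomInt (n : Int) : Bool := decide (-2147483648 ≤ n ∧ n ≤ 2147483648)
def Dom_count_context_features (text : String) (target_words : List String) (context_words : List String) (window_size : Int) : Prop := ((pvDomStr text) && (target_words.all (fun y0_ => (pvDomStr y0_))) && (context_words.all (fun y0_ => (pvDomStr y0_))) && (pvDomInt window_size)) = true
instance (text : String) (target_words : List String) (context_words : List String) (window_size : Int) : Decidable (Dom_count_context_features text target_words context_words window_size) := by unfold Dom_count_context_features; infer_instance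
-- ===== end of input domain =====

-- B replaces A's per-target window slicing and scan of every context word by a prefix-sum
-- table of a context-word indicator, read off as a difference of two entries per target.

-- ===== PORT A =====
def count_context_features (text : String) (target_words : List String) (context_words : List String) (window_size : Int) : Int × Int :=
  let tokens := PySem.Str.split₀ text
  (PySem.List.enumerate tokens 0).foldl
    (fun (st : Int × Int) (p : Int × String) =>
      if p.2 ∈ target_words then
        let left_context := PySem.List.slice tokens (some (max 0 (p.1 - window_size))) (some p.1)
        let right_context := PySem.List.slice tokens (some (p.1 + 1)) (some (p.1 + 1 + window_size))
        let context := left_context ++ right_context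
        if context_words.any (fun context_word => decide (context_word ∈ context)) then
          (st.1 + 1, st.2)
        else
          (st.1, st.2 + 1)
      else st)
    (0, 0)

-- ===== PORT B =====
def count_context_features_alt (text : String) (target_words : List String) (context_words : List String) (window_size : Int) : Int × Int :=
  let tokens := PySem.Str.split₀ text
  let targets : PySem.Set String := PySem.Set.ofList target_words
  let contexts : PySem.Set String := PySem.Set.ofList context_words
  let n := tokens.length
  let w := max window_size 0
  let pfxs := tokens.foldl
    (fun (pfx : List Int) tok =>
      pfx ++ [PySem.List.pyGetD pfx (-1) 0 + (if PySem.Set.contains contexts tok then 1 else 0)])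
    [0]
  (PySem.List.enumerate tokens 0).foldl
    (fun (st : Int × Int) (p : Int × String) =>
      if PySem.Set.contains targets p.2 then
        let lo := max 0 (p.1 - w)
        let hi := min (n : Int) (p.1 + 1 + w)
        if PySem.List.pyGetD pfxs hi 0 - PySem.List.pyGetD pfxs lo 0
            - (if PySem.Set.contains contexts p.2 then 1 else 0) > 0 then
          (st.1 + 1, st.2)
        else
          (st.1, st.2 + 1)
      else st)
    (0, 0)

-- ===== PRECONDITION & SPEC =====
-- For negative window_size with a target word near the start of a long enough token list, A's
-- right slice tokens[i+1:i+1+window_size] gets a negative end index that wraps to the end of the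
-- list, so A counts such targets as near context words lying outside any window; B treats a
-- negative window as empty and counts every target as far, the intended reading of a window size.
def D_count_context_features (text : String) (target_words : List String) (context_words : List String) (window_size : Int) : Prop :=
  let ts := PySem.Str.split₀ text
  window_size < 0 ∧ ∃ i ∈ List.range ts.length,
    ts.getD i "" ∈ target_words ∧ i + 1 < (-window_size).toNat ∧
    ∃ t ∈ (ts.drop (i + 1)).take (ts.length - (-window_size).toNat), t ∈ context_words

instance (text : String) (target_words : List String) (context_words : List String) (window_size : Int) : Decidable (D_count_context_features text target_words context_words window_size) := by unfold D_count_context_features; infer_instance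

def Spec_count_context_features (text : String) (target_words : List String) (context_words : List String) (window_size : Int) (out : Int × Int) : Prop := ¬ D_count_context_features text target_words context_words window_size → out = count_context_features_alt text target_words context_words window_size
instance (text : String) (target_words : List String) (context_words : List String) (window_size : Int) (out : Int × Int) : Decidable (Spec_count_context_features text target_words context_words window_size out) := by unfold Spec_count_context_features; infer_instance

def pvDiffWitness_count_context_features : String × List String × List String × Int :=
  ("a b c", ["a"], ["b"], -2)
def pvDiffWitnessOut_count_context_features : (Int × Int) × (Int × Int) := ((1, 0), (0, 1))

-- ===== CLAIM (what is proved, stated in full; the proofs are below) =====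
def Claim_unchanged_count_context_features : Prop := ∀ (text : String) (target_words : List String) (context_words : List String) (window_size : Int), Dom_count_context_features text target_words context_words window_size → Spec_count_context_features text target_words context_words window_size (count_context_features text target_words context_words window_size)
def Claim_changed_count_context_features : Prop := Dom_count_context_features (pvDiffWitness_count_context_features.1) (pvDiffWitness_count_context_features.2.1) (pvDiffWitness_count_context_features.2.2.1) (pvDiffWitness_count_context_features.2.2.2) ∧ D_count_context_features (pvDiffWitness_count_context_features.1) (pvDiffWitness_count_context_features.2.1) (pvDiffWitness_count_context_features.2.2.1) (pvDiffWitness_count_context_features.2.2.2) ∧ count_context_features (pvDiffWitness_count_context_features.1) (pvDiffWitness_count_context_features.2.1) (pvDiffWitness_count_context_features.2.2.1) (pvDiffWitness_count_context_features.2.2.2) = pvDiffWitnessOut_count_context_features.1 ∧ count_context_features_alt (pvDiffWitness_count_context_features.1) (pvDiffWitness_count_context_features.2.1) (pvDiffWitness_count_context_features.2.2.1) (pvDiffWitness_count_context_features.2.2.2) = pvDiffWitnessOut_count_context_features.2 ∧ pvDiffWitnessOut_count_context_features.1 ≠ pvDiffWitnessOut_count_context_features.2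
def Claim_exact_count_context_features : Prop := ∀ (text : String) (target_words : List String) (context_words : List String) (window_size : Int), Dom_count_context_features text target_words context_words window_size → D_count_context_features text target_words context_words window_size → count_context_features text target_words context_words window_size ≠ count_context_features_alt text target_words context_words window_size

-- ===== LEMMAS AND PROOFS =====

-- the context-word count among the first m tokens (value of B's prefix array at index m)
def pvCnt (context_words : List String) (tokens : List String) (m : Nat) : Int :=
  ((tokens.take m).countP (fun t => PySem.Set.contains (PySem.Set.ofList context_words) t) : Int)

-- B's prefix array is the table of pvCnt values
theorem pvPrefix_eq (context_words tokens : List String) :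
    tokens.foldl
      (fun (pfx : List Int) tok =>
        pfx ++ [PySem.List.pyGetD pfx (-1) 0 +
          (if PySem.Set.contains (PySem.Set.ofList context_words) tok then 1 else 0)])
      [0]
    = (List.range (tokens.length + 1)).map (pvCnt context_words tokens) := by
  induction tokens using List.reverseRecOn with
  | nil => simp [pvCnt]
  | append_singleton l x ih =>
    rw [List.foldl_append, ih]
    simp only [List.foldl_cons, List.foldl_nil, List.length_append, List.length_singleton]
    have h2 : PySem.List.pyGetD ((List.range (l.length + 1)).map (pvCnt context_words l)) (-1) 0
        = pvCnt context_words l l.length := by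
      rw [List.range_succ, List.map_append]
      exact PySem.List.pyGetD_neg_one_append_singleton _ _ _
    rw [h2]
    have h1 : (List.range (l.length + 1)).map (pvCnt context_words (l ++ [x]))
        = (List.range (l.length + 1)).map (pvCnt context_words l) := by
      apply List.map_congr_left
      intro m hm
      rw [List.mem_range] at hm
      unfold pvCnt
      rw [List.take_append_of_le_length (by omega)]
    conv_rhs => rw [show l.length + 1 + 1 = (l.length + 1) + 1 from rfl, List.range_succ,
      List.map_append, h1]
    congr 1
    unfold pvCnt
    simp only [List.map_cons, List.map_nil]
    have htk : List.take (l.length + 1) (l ++ [x]) = l ++ [x] := by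
      apply List.take_of_length_le
      simp
    rw [htk, List.countP_append, List.countP_cons]
    push_cast
    split_ifs <;> simp

-- reading B's prefix table
theorem pvGetD_table (C : Nat → Int) (n : Nat) (m : Int) (h0 : 0 ≤ m) (h1 : m ≤ (n : Int)) :
    PySem.List.pyGetD ((List.range (n + 1)).map C) m 0 = C m.toNat := by
  rw [show m = ((m.toNat : Nat) : Int) from by omega, PySem.List.pyGetD_natCast]
  rw [List.getD_eq_getElem _ _ (by simp; omega)]
  simp
  congr 1
  omega

-- counting a window by a difference of prefix counts
theorem pvCount_window (p : String → Bool) (l : List String) (lo k hi : Nat)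
    (hlo : lo ≤ k) (hk : k < l.length) (hhi : k < hi) :
    (l.take hi).countP p
      = (l.take lo).countP p + ((l.drop lo).take (k - lo)).countP p
        + (if p l[k] then 1 else 0) + ((l.drop (k + 1)).take (hi - (k + 1))).countP p := by
  conv_lhs => rw [show hi = lo + ((k - lo) + ((hi - (k + 1)) + 1)) from by omega]
  rw [List.take_add, List.countP_append, List.take_add, List.countP_append]
  simp only [List.drop_drop]
  rw [show lo + (k - lo) = k from by omega]
  rw [← List.getElem_cons_drop hk, List.take_succ_cons, List.countP_cons]
  split_ifs <;> omega

-- A's empty left slice for a negative window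
theorem pvSliceNeg_left (tokens : List String) (ws : Int) (k : Nat) (hws : ws < 0) :
    PySem.List.slice tokens (some (max 0 ((k : Int) - ws))) (some (k : Int)) = [] := by
  simp only [PySem.List.slice, PySem.List.clampIdx]
  split_ifs <;> simp <;> omega

-- A's right slice for a negative window whose end index stays nonnegative
theorem pvSliceNeg_right_empty (tokens : List String) (ws : Int) (k : Nat)
    (hws : ws < 0) (hge : 0 ≤ (k : Int) + 1 + ws) (hk : k < tokens.length) :
    PySem.List.slice tokens (some ((k : Int) + 1)) (some ((k : Int) + 1 + ws)) = [] := by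
  simp only [PySem.List.slice, PySem.List.clampIdx]
  split_ifs <;> simp <;> omega

-- A's right slice for a negative window whose end index wraps
theorem pvSliceNeg_right_wrap (tokens : List String) (ws : Int) (k : Nat)
    (hws : ws < 0) (hneg : (k : Int) + 1 + ws < 0) (hk : k < tokens.length) :
    PySem.List.slice tokens (some ((k : Int) + 1)) (some ((k : Int) + 1 + ws))
      = (tokens.drop (k + 1)).take (tokens.length - (-ws).toNat) := by
  simp only [PySem.List.slice, PySem.List.clampIdx]
  rw [if_neg (by omega : ¬ ((k : Int) + 1 < 0)), if_pos hneg]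
  by_cases h : (tokens.length : Int) + ((k : Int) + 1 + ws) < 0
  · rw [if_pos h]
    have e1 : (0 : Nat) - min ((k : Int) + 1).toNat tokens.length = 0 := by omega
    have e2 : tokens.length - (-ws).toNat = 0 := by omega
    rw [e1, e2]
    simp
  · rw [if_neg h]
    rw [show min ((k : Int) + 1).toNat tokens.length = k + 1 from by omega]
    rw [List.take_eq_take_iff]
    simp only [List.length_drop]
    omega

-- the window-membership reading of A's near test
theorem pvAny_iff (cw : List String) (W : List String) :
    (cw.any (fun c => decide (c ∈ W)) = true)
      ↔ 0 < W.countP (fun t => PySem.Set.contains (PySem.Set.ofList cw) t) := by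
  rw [List.any_eq_true, List.countP_pos_iff]
  constructor
  · rintro ⟨c, hc, hcW⟩
    exact ⟨c, by simpa using hcW, by simp [PySem.Set.mem_ofList, hc]⟩
  · rintro ⟨t, htW, ht⟩
    rw [PySem.Set.contains_iff, PySem.Set.mem_ofList] at ht
    exact ⟨t, ht, by simpa using htW⟩

-- a fold whose steps never change the first component
theorem pvFoldl_fst_const {β : Type} (l : List β) (f : Int × Int → β → Int × Int)
    (st : Int × Int) (h : ∀ st' p, p ∈ l → (f st' p).1 = st'.1) :
    (l.foldl f st).1 = st.1 := by
  induction l generalizing st with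
  | nil => rfl
  | cons x xs ih =>
    rw [List.foldl_cons, ih _ (fun st' p hp => h st' p (List.mem_cons_of_mem x hp))]
    exact h st x (List.mem_cons_self)

-- a fold whose steps never decrease the first component
theorem pvFoldl_fst_mono {β : Type} (l : List β) (f : Int × Int → β → Int × Int)
    (st : Int × Int) (h : ∀ st' p, st'.1 ≤ (f st' p).1) :
    st.1 ≤ (l.foldl f st).1 := by
  induction l generalizing st with
  | nil => exact le_refl _
  | cons x xs ih => exact le_trans (h st x) (ih (f st x))

-- B's zero window count for a zero-width window
theorem pvCnt_succ (cw tokens : List String) (k : Nat) (hk : k < tokens.length) :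
    pvCnt cw tokens (k + 1)
      = pvCnt cw tokens k
        + (if PySem.Set.contains (PySem.Set.ofList cw) tokens[k] then 1 else 0) := by
  unfold pvCnt
  rw [List.take_succ, List.getElem?_eq_getElem hk]
  simp only [Option.toList_some, List.countP_append, List.countP_cons, List.countP_nil]
  push_cast
  (try split_ifs) <;> simp

theorem count_context_features_spec : Claim_unchanged_count_context_features := by
  unfold Claim_unchanged_count_context_features
  intro text target_words context_words window_size _hdom
  unfold Spec_count_context_features
  intro hnD
  simp only [count_context_features, count_context_features_alt]
  simp only [pvPrefix_eq]
  apply PySem.List.foldl_congr_mem'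
  intro p hp st
  obtain ⟨k, hk, rfl⟩ := (PySem.List.mem_enumerate_iff _ _ _).1 hp
  simp only [zero_add]
  by_cases ht : (PySem.Str.split₀ text)[k] ∈ target_words
  swap
  · have htB : ¬ ((PySem.Set.ofList target_words).contains (PySem.Str.split₀ text)[k] = true) := by
      rw [PySem.Set.contains_iff, PySem.Set.mem_ofList]; exact ht
    rw [if_neg ht, if_neg htB]
  have htB : (PySem.Set.ofList target_words).contains (PySem.Str.split₀ text)[k] = true := by
    rw [PySem.Set.contains_iff, PySem.Set.mem_ofList]; exact ht
  rw [if_pos ht, if_pos htB]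
  by_cases hws : 0 ≤ window_size
  · -- nonnegative window: prefix-difference counts the window
    rw [max_eq_left hws]
    rw [pvGetD_table _ _ _ (by omega) (by omega)]
    rw [pvGetD_table _ _ _ (by omega) (by omega)]
    rw [PySem.List.slice_toNat _ (le_max_left _ _) (Int.natCast_nonneg k)]
    rw [PySem.List.slice_toNat _ (by omega) (by omega)]
    rw [Int.toNat_natCast]
    rw [show ((k : Int) + 1).toNat = k + 1 from by omega]
    apply if_congr _ rfl rfl
    rw [pvAny_iff]
    set lo := (max 0 ((k : Int) - window_size)).toNat with hlo
    set hi := (min ((PySem.Str.split₀ text).length : Int) ((k : Int) + 1 + window_size)).toNat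
      with hhi
    have hdec := pvCount_window (fun t => PySem.Set.contains (PySem.Set.ofList context_words) t)
      (PySem.Str.split₀ text) lo k hi (by omega) hk (by omega)
    have htake : List.take (((k : Int) + 1 + window_size).toNat - (k + 1))
          (List.drop (k + 1) (PySem.Str.split₀ text))
        = List.take (hi - (k + 1)) (List.drop (k + 1) (PySem.Str.split₀ text)) := by
      rw [List.take_eq_take_iff]
      simp only [List.length_drop]
      omega
    rw [htake, List.countP_append]
    unfold pvCnt
    rw [hdec]
    push_cast
    split_ifs <;> omega
  · -- negative window: B's window is empty, and so is A's unless the end index wraps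
    rw [max_eq_right (by omega : window_size ≤ 0)]
    rw [show (k : Int) + 1 + 0 = (k : Int) + 1 from by ring, sub_zero]
    rw [min_eq_right (by omega : (k : Int) + 1 ≤ ((PySem.Str.split₀ text).length : Int))]
    rw [max_eq_right (Int.natCast_nonneg k)]
    rw [pvGetD_table _ _ _ (by omega) (by omega)]
    rw [pvGetD_table _ _ _ (by omega) (by omega)]
    rw [Int.toNat_natCast, show ((k : Int) + 1).toNat = k + 1 from by omega]
    rw [pvCnt_succ _ _ _ hk]
    rw [if_neg (show ¬ ((pvCnt context_words (PySem.Str.split₀ text) k +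
          (if (PySem.Set.ofList context_words).contains (PySem.Str.split₀ text)[k] = true then (1:Int) else 0)) -
          pvCnt context_words (PySem.Str.split₀ text) k -
          (if (PySem.Set.ofList context_words).contains (PySem.Str.split₀ text)[k] = true then (1:Int) else 0) > 0)
        from by split_ifs <;> omega)]
    rw [pvSliceNeg_left _ _ _ (by omega)]
    by_cases hneg : (k : Int) + 1 + window_size < 0
    · rw [pvSliceNeg_right_wrap _ _ _ (by omega) hneg hk, List.nil_append]
      rw [if_neg]
      rw [List.any_eq_true]
      rintro ⟨c, hc, hcW⟩
      apply hnD
      refine ⟨by omega, k, List.mem_range.2 hk, ?_, by omega, c, by simpa using hcW, hc⟩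
      rw [List.getD_eq_getElem _ _ hk]
      exact ht
    · rw [pvSliceNeg_right_empty _ _ _ (by omega) (by omega) hk]
      simp

-- with a negative window B counts no target as near
theorem pvAlt_fst_neg (text : String) (target_words context_words : List String)
    (window_size : Int) (hws : window_size < 0) :
    (count_context_features_alt text target_words context_words window_size).1 = 0 := by
  simp only [count_context_features_alt]
  simp only [pvPrefix_eq]
  rw [pvFoldl_fst_const]
  intro st p hp
  obtain ⟨k, hk, rfl⟩ := (PySem.List.mem_enumerate_iff _ _ _).1 hp
  simp only [zero_add]
  by_cases ht : PySem.Set.contains (PySem.Set.ofList target_words) (PySem.Str.split₀ text)[k]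
  swap
  · rw [if_neg ht]
  rw [if_pos ht]
  rw [max_eq_right (by omega : window_size ≤ 0)]
  rw [show (k : Int) + 1 + 0 = (k : Int) + 1 from by ring, sub_zero]
  rw [min_eq_right (by omega : (k : Int) + 1 ≤ ((PySem.Str.split₀ text).length : Int))]
  rw [max_eq_right (Int.natCast_nonneg k)]
  rw [pvGetD_table _ _ _ (by omega) (by omega)]
  rw [pvGetD_table _ _ _ (by omega) (by omega)]
  rw [Int.toNat_natCast, show ((k : Int) + 1).toNat = k + 1 from by omega]
  rw [pvCnt_succ _ _ _ hk]
  rw [if_neg (show ¬ ((pvCnt context_words (PySem.Str.split₀ text) k +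
          (if (PySem.Set.ofList context_words).contains (PySem.Str.split₀ text)[k] = true then (1:Int) else 0)) -
          pvCnt context_words (PySem.Str.split₀ text) k -
          (if (PySem.Set.ofList context_words).contains (PySem.Str.split₀ text)[k] = true then (1:Int) else 0) > 0)
        from by split_ifs <;> omega)]

theorem count_context_features_tight : Claim_exact_count_context_features := by
  unfold Claim_exact_count_context_features
  intro text target_words context_words window_size _hdom hD
  obtain ⟨hws, k, hkr, htg, hneg, t, htW, htcw⟩ := hD
  have hk : k < (PySem.Str.split₀ text).length := List.mem_range.1 hkr
  rw [List.getD_eq_getElem _ _ hk] at htg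
  intro heq
  have hB : (count_context_features_alt text target_words context_words window_size).1 = 0 :=
    pvAlt_fst_neg _ _ _ _ hws
  have hmono : ∀ (st : Int × Int) (p : Int × String), st.1 ≤
      ((fun (st : Int × Int) (p : Int × String) =>
        if p.2 ∈ target_words then
          if context_words.any (fun context_word => decide (context_word ∈
              PySem.List.slice (PySem.Str.split₀ text) (some (max 0 (p.1 - window_size)))
                (some p.1) ++
              PySem.List.slice (PySem.Str.split₀ text) (some (p.1 + 1))
                (some (p.1 + 1 + window_size)))) then
            (st.1 + 1, st.2)
          else (st.1, st.2 + 1)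
        else st) st p).1 := by
    intro st p
    dsimp only
    split_ifs <;> simp
  have hA : 1 ≤ (count_context_features text target_words context_words window_size).1 := by
    simp only [count_context_features]
    have hkE : k < (PySem.List.enumerate (PySem.Str.split₀ text) 0).length := by
      rw [PySem.List.length_enumerate]; exact hk
    have hsplit : PySem.List.enumerate (PySem.Str.split₀ text) 0
        = (PySem.List.enumerate (PySem.Str.split₀ text) 0).take k
          ++ (0 + (k : Int), (PySem.Str.split₀ text)[k])
            :: (PySem.List.enumerate (PySem.Str.split₀ text) 0).drop (k + 1) := by
      conv_lhs => rw [← List.take_append_drop k (PySem.List.enumerate (PySem.Str.split₀ text) 0)]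
      rw [← List.getElem_cons_drop hkE, PySem.List.getElem_enumerate]
    rw [hsplit, List.foldl_append, List.foldl_cons]
    refine le_trans ?_ (pvFoldl_fst_mono _ _ _ hmono)
    simp only [zero_add]
    rw [if_pos htg]
    rw [pvSliceNeg_left _ _ _ hws, pvSliceNeg_right_wrap _ _ _ hws (by omega) hk,
      List.nil_append]
    rw [if_pos (List.any_eq_true.2 ⟨t, htcw, by simpa using htW⟩)]
    have := pvFoldl_fst_mono
      ((PySem.List.enumerate (PySem.Str.split₀ text) 0).take k) _ ((0 : Int), (0 : Int)) hmono
    simp only at this ⊢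
    omega
  rw [heq] at hA
  omega

theorem count_context_features_changed : Claim_changed_count_context_features := by
  unfold Claim_changed_count_context_features; decide
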